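-- pv_equiv track=rewrite | github.com/nlpcl-lab/dialog_evaluation_w_hard_negative | run_sparse_retrieval.py | make_docs
-- ===== SOURCE A (Python) =====
-- def make_docs(raw_data):
--     datas = []
--     for conv in raw_data:
--         for idx in range(len(conv[:-1])):
--             uttrs = conv[: idx + 2]
--             context, reply = " ".join(uttrs[:-1]), uttrs[-1]
--             datas.append({"id": "doc" + str(1 + len(datas)), "contents": context, "reply": reply})
--     return datas
-- ===== SOURCE B (Python) =====
-- def make_docs(raw_data):
--     # pass 1: flat (context, reply) pairs with a running prefix accumulator
--     pairs = []
--     for conv in raw_data: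
--         ctx = None
--         for u in conv:
--             if ctx is None:
--                 ctx = u
--             else:
--                 pairs.append((ctx, u))
--                 ctx = ctx + " " + u
--     # pass 2: assign global ids
--     return [{"id": "doc" + str(i + 1), "contents": c, "reply": r}
--             for i, (c, r) in enumerate(pairs)]
-- ===== Notes on version B (the rewrite author's own statement) =====
-- stated objective: alternative
-- what changed: B replaces A's nested index loop with repeated slicing and re-joining (conv[:idx+2], ' '.join) by two passes: one pass growing the context string incrementally while collecting flat (context, reply) pairs, then an enumerate pass assigning ids; A recomputes each context join from scratch.
import Mathlib
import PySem

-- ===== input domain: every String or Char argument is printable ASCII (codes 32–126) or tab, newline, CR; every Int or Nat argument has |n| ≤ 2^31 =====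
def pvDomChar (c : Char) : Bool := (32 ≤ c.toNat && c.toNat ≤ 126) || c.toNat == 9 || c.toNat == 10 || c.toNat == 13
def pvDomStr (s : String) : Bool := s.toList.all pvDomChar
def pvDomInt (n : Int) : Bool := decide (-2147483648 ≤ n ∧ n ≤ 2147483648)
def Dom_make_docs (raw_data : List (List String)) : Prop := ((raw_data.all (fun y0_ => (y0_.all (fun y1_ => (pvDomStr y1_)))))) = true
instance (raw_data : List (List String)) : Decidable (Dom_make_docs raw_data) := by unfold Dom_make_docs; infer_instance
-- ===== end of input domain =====

-- B replaces A's per-pair re-slicing and re-joining by one pass growing the context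
-- incrementally while collecting flat (context, reply) pairs, then a second pass
-- assigning ids; objective: alternative decomposition (not claimed faster).

-- ===== PORT A =====
-- body of A's inner loop, hoisted as a helper (id from current datas length; locals as lets)
def pvDocA (conv : List String) (n : Int) (idx : Int) : List (String × String) :=
  let uttrs := PySem.List.slice conv none (some (idx + 2))
  let context := PySem.Str.join " " (PySem.List.slice uttrs none (some (-1)))
  -- uttrs[-1]: uttrs is nonempty for every idx the range produces, so the default is unreachable
  let reply := (PySem.List.pyGet? uttrs (-1)).getD ""
  [("id", "doc" ++ PySem.Int.toStr n), ("contents", context), ("reply", reply)]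

def make_docs (raw_data : List (List String)) : List (List (String × String)) :=
  raw_data.foldl (fun datas conv =>
    (PySem.List.pyRange 0 (((PySem.List.slice conv none (some (-1))).length : Int)) 1).foldl
      (fun datas idx => datas ++ [pvDocA conv (1 + (datas.length : Int)) idx])
      datas) []

-- ===== PORT B =====
-- one step of Source B's inner loop: state = (pairs so far, running context or none)
def pvStepB (st : List (String × String) × Option String) (u : String) :
    List (String × String) × Option String :=
  match st.2 with
  | none => (st.1, some u)
  | some c => (st.1 ++ [(c, u)], some (c ++ " " ++ u))

def make_docs_alt (raw_data : List (List String)) : List (List (String × String)) :=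
  let pairs := raw_data.foldl (fun ps conv => (conv.foldl pvStepB (ps, none)).1) []
  (PySem.List.enumerate pairs).map (fun p =>
    [("id", "doc" ++ PySem.Int.toStr (p.1 + 1)), ("contents", p.2.1), ("reply", p.2.2)])

-- ===== PRECONDITION & SPEC =====
def Spec_make_docs (raw_data : List (List String)) (out : List (List (String × String))) : Prop := out = make_docs_alt raw_data
instance (raw_data : List (List String)) (out : List (List (String × String))) : Decidable (Spec_make_docs raw_data out) := by unfold Spec_make_docs; infer_instance

-- ===== CLAIM (what is proved, stated in full; the proofs are below) =====
def Claim_equal_make_docs : Prop := ∀ (raw_data : List (List String)), Dom_make_docs raw_data → Spec_make_docs raw_data (make_docs raw_data)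

-- ===== LEMMAS AND PROOFS =====

-- canonical flat pair list of one conversation
def pvJ (xs : List String) : String := PySem.Str.join " " xs

def pvC (conv : List String) : List (String × String) :=
  (List.range (conv.length - 1)).map (fun i => (pvJ (conv.take (i + 1)), (conv[i + 1]?).getD ""))

def pvMk (n : Int) (p : String × String) : List (String × String) :=
  [("id", "doc" ++ PySem.Int.toStr n), ("contents", p.1), ("reply", p.2)]

lemma chars_join_snoc (sep : List Char) (p : List (List Char)) (hp : p ≠ []) (v : List Char) :
    PySem.Chars.join sep (p ++ [v]) = PySem.Chars.join sep p ++ sep ++ v := by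
  induction p with
  | nil => exact absurd rfl hp
  | cons a rest ih =>
    cases rest with
    | nil => simp [PySem.Chars.join, List.intercalate]
    | cons b r =>
      have h := ih (by simp)
      rw [List.cons_append] at h
      rw [show ((a :: b :: r) ++ [v]) = a :: b :: (r ++ [v]) by simp]
      rw [PySem.Chars.join_cons_cons, PySem.Chars.join_cons_cons, h]
      simp [List.append_assoc]

lemma pvJ_snoc (p : List String) (hp : p ≠ []) (v : String) :
    pvJ (p ++ [v]) = pvJ p ++ " " ++ v := by
  apply String.toList_injective
  simp only [pvJ, PySem.Str.toList_join, List.map_append, List.map_cons, List.map_nil,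
    String.toList_append]
  rw [chars_join_snoc _ _ (by simpa using hp)]

lemma pvJ_singleton (u : String) : pvJ [u] = u := by
  apply String.toList_injective
  simp [pvJ, PySem.Str.toList_join, PySem.Chars.join_singleton]

-- generic shape of A's emit loop
lemma foldl_emit {β γ : Type} (l : List β) (g : Int → β → γ) (acc : List γ) :
    l.foldl (fun ds b => ds ++ [g (1 + (ds.length : Int)) b]) acc
      = acc ++ (PySem.List.enumerate l (acc.length : Int)).map (fun p => g (1 + p.1) p.2) := by
  induction l generalizing acc with
  | nil => simp
  | cons b bs ih =>
    simp only [List.foldl_cons, PySem.List.enumerate_cons, List.map_cons]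
    rw [ih]
    simp [List.append_assoc]

lemma enumerate_map_snd {α β : Type} (l : List α) (h : α → β) (s : Int) :
    PySem.List.enumerate (l.map h) s
      = (PySem.List.enumerate l s).map (fun p => (p.1, h p.2)) := by
  induction l generalizing s with
  | nil => simp
  | cons a l ih => simp [PySem.List.enumerate_cons, ih]

lemma docA_eq (conv : List String) (n : Int) (k : Nat) (hk : k < conv.length - 1) :
    pvDocA conv n ((0 : Int) + (k : Int))
      = pvMk n (pvJ (conv.take (k + 1)), (conv[k + 1]?).getD "") := by
  have hlen : k + 2 ≤ conv.length := by omega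
  have h2 : ((0 : Int) + (k : Int)) + 2 = ((k + 2 : Nat) : Int) := by push_cast; ring
  simp only [pvDocA, pvMk, h2, PySem.List.slice_to_natCast, PySem.List.slice_to_neg_one,
    PySem.List.pyGet?_neg_one]
  have hlt : (List.take (k + 2) conv).length = k + 2 := by
    simp [List.length_take]; omega
  have hctx : (List.take (k + 2) conv).dropLast = List.take (k + 1) conv := by
    rw [List.dropLast_eq_take, hlt]
    simp [List.take_take]
  have hrep : (List.take (k + 2) conv).getLast? = conv[k + 1]? := by
    rw [List.getLast?_eq_getElem?, hlt]
    simp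
  rw [hctx, hrep]
  rfl

-- A's inner loop over one conversation
lemma A_inner (conv : List String) (datas : List (List (String × String))) :
    (PySem.List.pyRange 0 (((PySem.List.slice conv none (some (-1))).length : Int)) 1).foldl
      (fun datas idx => datas ++ [pvDocA conv (1 + (datas.length : Int)) idx]) datas
    = datas ++ (PySem.List.enumerate (pvC conv) (datas.length : Int)).map
        (fun p => pvMk (1 + p.1) p.2) := by
  rw [PySem.List.slice_to_neg_one, foldl_emit, PySem.List.pyRange_one]
  have hlen : (((conv.dropLast.length : Int)) - 0).toNat = conv.length - 1 := by
    simp [List.length_dropLast]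
  rw [hlen, enumerate_map_snd, List.map_map]
  simp only [pvC]
  rw [enumerate_map_snd, List.map_map]
  refine congrArg (datas ++ ·) (List.map_congr_left ?_)
  intro q hq
  obtain ⟨k, hklt, rfl⟩ := (PySem.List.mem_enumerate_iff _ _ _).1 hq
  have hk : k < conv.length - 1 := by simpa using hklt
  simp only [Function.comp_apply, List.getElem_range]
  exact docA_eq conv _ k hk

-- B's inner loop with running context
lemma B_go (vs p : List String) (hp : p ≠ []) (ps : List (String × String)) :
    (vs.foldl pvStepB (ps, some (pvJ p))).1
      = ps ++ (List.range vs.length).map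
          (fun i => (pvJ (p ++ vs.take i), (vs[i]?).getD "")) := by
  induction vs generalizing p ps with
  | nil => simp
  | cons v vs ih =>
    simp only [List.foldl_cons, pvStepB]
    rw [show pvJ p ++ " " ++ v = pvJ (p ++ [v]) from (pvJ_snoc p hp v).symm]
    rw [ih (p ++ [v]) (by simp)]
    simp only [List.length_cons, List.range_succ_eq_map, List.map_cons, List.map_map]
    simp [List.append_assoc, Function.comp]

lemma B_inner (conv : List String) (ps : List (String × String)) :
    (conv.foldl pvStepB (ps, none)).1 = ps ++ pvC conv := by
  cases conv with
  | nil => simp [pvC]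
  | cons u us =>
    simp only [List.foldl_cons, pvStepB]
    rw [show (some u : Option String) = some (pvJ [u]) by rw [pvJ_singleton]]
    rw [B_go us [u] (by simp) ps]
    congr 1

-- outer loops
lemma A_outer (raw : List (List String)) (acc : List (List (String × String))) :
    raw.foldl (fun datas conv =>
      (PySem.List.pyRange 0 (((PySem.List.slice conv none (some (-1))).length : Int)) 1).foldl
        (fun datas idx => datas ++ [pvDocA conv (1 + (datas.length : Int)) idx]) datas) acc
    = acc ++ (PySem.List.enumerate (raw.flatMap pvC) (acc.length : Int)).map
        (fun p => pvMk (1 + p.1) p.2) := by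
  induction raw generalizing acc with
  | nil => simp
  | cons conv rest ih =>
    simp only [List.foldl_cons]
    rw [A_inner conv acc, ih]
    simp only [List.flatMap_cons]
    rw [PySem.List.enumerate_append]
    simp [List.append_assoc]

lemma B_pairs (raw : List (List String)) (acc : List (String × String)) :
    raw.foldl (fun ps conv => (conv.foldl pvStepB (ps, none)).1) acc
      = acc ++ raw.flatMap pvC := by
  induction raw generalizing acc with
  | nil => simp
  | cons conv rest ih =>
    simp only [List.foldl_cons]
    rw [B_inner conv acc, ih]
    simp [List.append_assoc]

-- ===== VERDICT (by name: the statement is the Claim_ definition above) =====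
theorem make_docs_spec : Claim_equal_make_docs := by
  intro raw _
  unfold Spec_make_docs make_docs make_docs_alt
  rw [A_outer raw [], B_pairs raw []]
  simp only [List.nil_append, List.length_nil, Nat.cast_zero]
  apply List.map_congr_left
  intro p _
  simp [pvMk, Int.add_comm]
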